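-- pv_equiv track=rewrite | github.com/jameslear314/AdventOfCode | 2015/1a.py | solve
-- ===== SOURCE A (Python) =====
-- def solve(input=''):
--   floor = 0
--   for char in input:
--     if char == '(':
--       floor += 1
--       continue
--     floor -= 1 # Yes, I know other characters could sneak in and break things.
--   return floor
-- ===== SOURCE B (Python) =====
-- def solve(input=''):
--   # Closed form: each '(' contributes +1, every other character -1,
--   # so floor = count('(') - (len - count('(')) = 2*count('(') - len.
--   return 2 * input.count('(') - len(input)
-- ===== Notes on version B (the rewrite author's own statement) =====
-- stated objective: faster
-- what changed: Replaces the per-character accumulating loop with the closed-form expression 2*input.count('(') - len(input), derived from the identity that every non-'(' character contributes -1.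
import Mathlib
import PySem

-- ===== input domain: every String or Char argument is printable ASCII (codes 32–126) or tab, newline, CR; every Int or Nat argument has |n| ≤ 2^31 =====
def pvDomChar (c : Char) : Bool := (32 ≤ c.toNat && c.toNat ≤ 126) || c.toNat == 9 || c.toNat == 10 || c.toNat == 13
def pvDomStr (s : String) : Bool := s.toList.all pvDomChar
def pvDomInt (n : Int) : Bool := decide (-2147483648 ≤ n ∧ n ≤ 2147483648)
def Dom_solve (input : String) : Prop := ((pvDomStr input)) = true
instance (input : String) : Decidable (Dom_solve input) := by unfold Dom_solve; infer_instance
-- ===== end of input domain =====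

-- B replaces A's accumulating per-character loop with the closed form 2*count('(') - len(input).

-- ===== PORT A =====
-- floor = 0; for char in input: floor += 1 if '(' else floor -= 1; return floor
def solve (input : String) : Int :=
  input.toList.foldl (fun floor char => if char = '(' then floor + 1 else floor - 1) 0

-- ===== PORT B =====
-- return 2 * input.count('(') - len(input)
def solve_alt (input : String) : Int :=
  2 * (PySem.Str.count input "(" : Int) - (PySem.Str.len input : Int)

-- ===== PRECONDITION & SPEC =====
def Spec_solve (input : String) (out : Int) : Prop := out = solve_alt input
instance (input : String) (out : Int) : Decidable (Spec_solve input out) := by unfold Spec_solve; infer_instance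

-- ===== CLAIM (what is proved, stated in full; the proofs are below) =====
def Claim_equal_solve : Prop := ∀ (input : String), Dom_solve input → Spec_solve input (solve input)

-- ===== LEMMAS AND PROOFS =====

-- A single-character substring count is the element count.
theorem chars_count_go_singleton (c : Char) (l : List Char) (fuel acc : Nat)
    (h : l.length ≤ fuel) :
    PySem.Chars.count.go [c] fuel l acc = acc + l.count c := by
  induction fuel generalizing l acc with
  | zero =>
    have hl : l = [] := List.length_eq_zero_iff.mp (Nat.le_zero.mp h)
    simp [hl, PySem.Chars.count.go]
  | succ n ih =>
    cases l with
    | nil => simp [PySem.Chars.count.go]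
    | cons hd t =>
      have ht : t.length ≤ n := Nat.lt_succ_iff.mp (by simpa using h)
      rw [PySem.Chars.count.go.eq_3]
      by_cases hc : hd = c
      · simp only [List.isPrefixOf, hc, beq_self_eq_true, Bool.true_and,
          if_true, List.length_singleton, List.drop_succ_cons,
          List.drop_zero, ih t (acc + 1) ht, List.count_cons_self]
        omega
      · have hbc : (c == hd) = false := beq_eq_false_iff_ne.mpr (Ne.symm hc)
        simp [List.isPrefixOf, hbc, ih t acc ht, hc]

theorem chars_count_singleton (c : Char) (l : List Char) :
    PySem.Chars.count l [c] = l.count c := by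
  simp [PySem.Chars.count, chars_count_go_singleton c l l.length 0 le_rfl]

theorem foldl_floor (l : List Char) (acc : Int) :
    l.foldl (fun floor char => if char = '(' then floor + 1 else floor - 1) acc
      = acc + 2 * (l.count '(' : Int) - (l.length : Int) := by
  induction l generalizing acc with
  | nil => simp
  | cons hd t ih =>
    by_cases hc : hd = '(' <;>
      simp [List.foldl_cons, hc, ih, eq_comm] <;> ring

-- ===== VERDICT (by name: the statement is the Claim_ definition above) =====
theorem solve_spec : Claim_equal_solve := by
  intro input _
  unfold Spec_solve solve solve_alt
  rw [PySem.Str.count_eq, PySem.Str.len, foldl_floor]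
  simp [chars_count_singleton]
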